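-- pv_equiv track=rewrite | github.com/linyawd/prog2couse_2025 | homework/hw17/t17_05e468.py | is_bst_path
-- ===== SOURCE A (Python) =====
-- def is_bst_path(path):
--     def check(i, low, high):
--         if i == len(path):
--             return False
--         x = path[i]
--         if not (low < x < high):
--             return False
--         j = i + 1
--         while j < len(path):
--             if path[j] < x:
--                 break
--             if path[j] > x:
--                 break
--             j += 1
--         if j == len(path):
--             return True
--         if path[j] < x:
--             return check(j, low, x)
--         return check(j, x, high)
--
--     return "YES" if check(0, float("-inf"), float("inf")) else "NO"
-- ===== SOURCE B (Python) =====
-- def is_bst_path(path):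
--     comp = []
--     for v in path:
--         if not comp or comp[-1] != v:
--             comp.append(v)
--     if not comp:
--         return "NO"
--     while len(comp) > 1:
--         x = comp[0]
--         left = comp[1] < x
--         if any(v == x or (v < x) != left for v in comp[1:]):
--             return "NO"
--         comp = comp[1:]
--     return "YES"
-- ===== Notes on version B (the rewrite author's own statement) =====
-- stated objective: alternative
-- what changed: Instead of A's recursive forward scan that maintains low/high bounds, B collapses consecutive duplicates and then checks the pairwise BST-path property (every later value lies strictly on the same side of each earlier value as that value's immediate successor), keeping no bounds at all.
import Mathlib
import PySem

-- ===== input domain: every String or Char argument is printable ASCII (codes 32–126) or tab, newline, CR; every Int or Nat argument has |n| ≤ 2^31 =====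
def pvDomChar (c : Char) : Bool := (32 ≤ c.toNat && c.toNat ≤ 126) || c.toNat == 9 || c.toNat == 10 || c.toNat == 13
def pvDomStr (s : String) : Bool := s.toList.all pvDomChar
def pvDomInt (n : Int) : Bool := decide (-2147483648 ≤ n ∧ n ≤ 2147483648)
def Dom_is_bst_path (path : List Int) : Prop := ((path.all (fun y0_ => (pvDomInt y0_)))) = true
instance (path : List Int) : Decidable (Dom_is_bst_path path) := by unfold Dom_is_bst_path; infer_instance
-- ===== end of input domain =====

-- B replaces A's recursive bound-tracking scan by a different algorithm: collapse
-- consecutive duplicates, then check the pairwise BST-path property (every later value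
-- lies strictly on the same side of each earlier value as its immediate successor).

-- ===== PORT A =====
-- A's float("-inf")/float("inf") bounds are modelled as Option Int (none = unbounded);
-- this is exact: the bounds are only ever ±inf or integer path elements, and Python
-- compares ints with float infinities exactly.

-- A's inner `while j < len(path): if path[j] < x: break; if path[j] > x: break; j += 1`
def skipA (path : List Int) (x : Int) (j : Nat) : Nat :=
  if h : j < path.length then
    if path[j] < x then j
    else if path[j] > x then j
    else skipA path x (j + 1)
  else j
termination_by path.length - j

theorem skipA_ge (path : List Int) (x : Int) (j : Nat) : j ≤ skipA path x j := by
  unfold skipA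
  split
  · split
    · exact le_refl j
    · split
      · exact le_refl j
      · exact le_trans (Nat.le_succ j) (skipA_ge path x (j + 1))
  · exact le_refl j
termination_by path.length - j

-- `low < x` / `x < high` against a possibly-infinite bound (none = ±inf)
def bndLow (low : Option Int) (x : Int) : Bool :=
  match low with | none => true | some l => decide (l < x)
def bndHigh (high : Option Int) (x : Int) : Bool :=
  match high with | none => true | some h => decide (x < h)

-- A's recursive `check(i, low, high)`.  Python tests `i == len(path)`; check is only ever
-- called with i ≤ len(path), so the `≤` guard (needed for Lean totality) is identical there;
-- element access is `getD _ 0`, exact since every access is guarded by an index-in-range test.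
def checkA (path : List Int) (i : Nat) (low high : Option Int) : Bool :=
  if path.length ≤ i then false
  else
    let x := path.getD i 0
    if ¬ ((bndLow low x && bndHigh high x) = true) then false
    else
      let j := skipA path x (i + 1)
      if j = path.length then true
      else if path.getD j 0 < x then checkA path j low (some x)
      else checkA path j (some x) high
termination_by path.length - i
decreasing_by all_goals (have h1 := skipA_ge path (path.getD i 0) (i + 1); omega)

def is_bst_path (path : List Int) : String :=
  if checkA path 0 none none then "YES" else "NO"

-- ===== PORT B =====
-- `if not comp or comp[-1] != v: comp.append(v)` inside B's for-loop
def stepC (comp : List Int) (v : Int) : List Int :=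
  if comp.isEmpty || comp.getLast? != some v then comp ++ [v] else comp

-- B's first pass: collapse consecutive duplicates
def compressB (path : List Int) : List Int := path.foldl stepC []

-- B's `while len(comp) > 1` loop, consuming comp from the front; the early
-- `return "NO"` on `any(v == x or (v < x) != left for v in comp[1:])` is the if-branch.
def loopB : List Int → String
  | [] => "YES"
  | [_] => "YES"
  | x :: y :: l =>
    if (y :: l).any (fun v => v == x || (decide (v < x) != decide (y < x))) then "NO"
    else loopB (y :: l)

def is_bst_path_alt (path : List Int) : String :=
  let comp := compressB path
  if comp = [] then "NO" else loopB comp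

-- ===== PRECONDITION & SPEC =====
def Spec_is_bst_path (path : List Int) (out : String) : Prop := out = is_bst_path_alt path
instance (path : List Int) (out : String) : Decidable (Spec_is_bst_path path out) := by unfold Spec_is_bst_path; infer_instance

-- ===== CLAIM (what is proved, stated in full; the proofs are below) =====
def Claim_equal_is_bst_path : Prop := ∀ (path : List Int), Dom_is_bst_path path → Spec_is_bst_path path (is_bst_path path)

-- ===== LEMMAS AND PROOFS =====

-- structural version of compressB
def myComp : List Int → List Int
  | [] => []
  | [x] => [x]
  | x :: y :: l => if x = y then myComp (y :: l) else x :: myComp (y :: l)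

-- structural version of A's check, over the compressed suffix
def chk : List Int → Option Int → Option Int → Bool
  | [], _, _ => false
  | x :: rest, low, high =>
    (bndLow low x && bndHigh high x) &&
    (match rest with
     | [] => true
     | y :: l => if y < x then chk (y :: l) low (some x) else chk (y :: l) (some x) high)

-- the pairwise property B checks
def P : List Int → Prop
  | [] => True
  | [_] => True
  | x :: y :: l => (∀ v ∈ y :: l, (v < x ↔ y < x) ∧ v ≠ x) ∧ P (y :: l)

def lowP (low : Option Int) (v : Int) : Prop :=
  match low with | none => True | some l => l < v
def highP (high : Option Int) (v : Int) : Prop :=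
  match high with | none => True | some h => v < h

theorem bndLow_iff (low : Option Int) (v : Int) : bndLow low v = true ↔ lowP low v := by
  cases low <;> simp [bndLow, lowP]

theorem bndHigh_iff (high : Option Int) (v : Int) : bndHigh high v = true ↔ highP high v := by
  cases high <;> simp [bndHigh, highP]

theorem foldl_stepC_shift (l acc0 : List Int) (a : Int) :
    List.foldl stepC (acc0 ++ [a]) l = acc0 ++ List.foldl stepC [a] l := by
  induction l generalizing acc0 a with
  | nil => simp
  | cons v l ih =>
    simp only [List.foldl_cons]
    by_cases hv : a = v
    · have h1 : stepC (acc0 ++ [a]) v = acc0 ++ [a] := by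
        simp [stepC, hv]
      have h2 : stepC [a] v = [a] := by simp [stepC, hv]
      rw [h1, h2, ih]
    · have h1 : stepC (acc0 ++ [a]) v = (acc0 ++ [a]) ++ [v] := by
        simp [stepC, hv]
      have h2 : stepC [a] v = [a] ++ [v] := by simp [stepC, hv]
      rw [h1, h2, ih ((acc0 ++ [a])) v, ih [a] v, List.append_assoc]

theorem foldl_stepC_myComp (l : List Int) (x : Int) :
    List.foldl stepC [x] l = myComp (x :: l) := by
  induction l generalizing x with
  | nil => rfl
  | cons v l ih =>
    simp only [List.foldl_cons]
    by_cases hv : x = v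
    · have h2 : stepC [x] v = [x] := by simp [stepC, hv]
      rw [h2, ih, myComp, if_pos hv, hv]
    · have h2 : stepC [x] v = [x] ++ [v] := by simp [stepC, hv]
      rw [h2, foldl_stepC_shift, ih, myComp, if_neg hv]
      rfl

theorem compressB_eq (path : List Int) : compressB path = myComp path := by
  cases path with
  | nil => rfl
  | cons x l =>
    have h : stepC [] x = [x] := by simp [stepC]
    simp only [compressB, List.foldl_cons, h]
    exact foldl_stepC_myComp l x

theorem myComp_cons (x : Int) (l : List Int) : ∃ r, myComp (x :: l) = x :: r := by
  induction l generalizing x with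
  | nil => exact ⟨[], rfl⟩
  | cons y l ih =>
    by_cases hv : x = y
    · obtain ⟨r, hr⟩ := ih y
      exact ⟨r, by rw [myComp, if_pos hv, hv, hr]⟩
    · exact ⟨myComp (y :: l), by rw [myComp, if_neg hv]⟩

theorem skipA_le (path : List Int) (x : Int) (j : Nat) (h : j ≤ path.length) :
    skipA path x j ≤ path.length := by
  unfold skipA
  split
  · split
    · omega
    · split
      · omega
      · exact skipA_le path x (j + 1) (by omega)
  · omega
termination_by path.length - j

theorem myComp_drop (path : List Int) (i : Nat) (hi : i < path.length) :
    myComp (List.drop i path) =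
      (if skipA path (path.getD i 0) (i + 1) = path.length then [path.getD i 0]
       else path.getD i 0 :: myComp (List.drop (skipA path (path.getD i 0) (i + 1)) path)) := by
  have hdrop : List.drop i path = path[i] :: List.drop (i + 1) path :=
    List.drop_eq_getElem_cons hi
  have hgd : path.getD i 0 = path[i] := by
    rw [List.getD_eq_getElem?_getD, List.getElem?_eq_getElem hi]; rfl
  by_cases h1 : i + 1 < path.length
  · have hdrop1 : List.drop (i + 1) path = path[i + 1] :: List.drop (i + 2) path :=
      List.drop_eq_getElem_cons h1
    have hgd1 : path.getD (i + 1) 0 = path[i + 1] := by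
      rw [List.getD_eq_getElem?_getD, List.getElem?_eq_getElem h1]; rfl
    rcases lt_trichotomy (path[i + 1]) (path[i]) with hc | hc | hc
    · have hs : skipA path (path.getD i 0) (i + 1) = i + 1 := by
        conv_lhs => unfold skipA
        rw [hgd]; simp [h1, hc]
      rw [hs, if_neg (by omega), hdrop, hdrop1, myComp, if_neg (by omega), hgd, ← hdrop1]
    · -- equal: the skip loop continues, myComp merges the duplicate
      have hs : skipA path (path.getD i 0) (i + 1) = skipA path (path.getD i 0) (i + 2) := by
        conv_lhs => unfold skipA
        rw [hgd]; simp [h1, hc]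
      have hm : myComp (List.drop i path) = myComp (List.drop (i + 1) path) := by
        rw [hdrop, hdrop1, myComp, if_pos hc.symm, ← hdrop1]
      have ih := myComp_drop path (i + 1) h1
      rw [hm, ih, hs, hgd, hgd1, hc]
    · have hs : skipA path (path.getD i 0) (i + 1) = i + 1 := by
        conv_lhs => unfold skipA
        rw [hgd]; simp [h1, not_lt_of_gt hc, hc]
      rw [hs, if_neg (by omega), hdrop, hdrop1, myComp, if_neg (by omega), hgd, ← hdrop1]
  · have hs : skipA path (path.getD i 0) (i + 1) = i + 1 := by
      conv_lhs => unfold skipA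
      simp [h1]
    have hlen : i + 1 = path.length := by omega
    have hdrop1 : List.drop (i + 1) path = [] := List.drop_eq_nil_of_le (by omega)
    rw [hs, if_pos hlen, hdrop, hdrop1, hgd, myComp]
termination_by path.length - i
decreasing_by omega

theorem chk_bnd_false (x : Int) (rest : List Int) (low high : Option Int)
    (hb : (bndLow low x && bndHigh high x) = false) : chk (x :: rest) low high = false := by
  cases rest <;> simp [chk, hb]

theorem checkA_eq_chk (path : List Int) (i : Nat) (low high : Option Int) :
    checkA path i low high = chk (myComp (List.drop i path)) low high := by
  by_cases hi : path.length ≤ i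
  · rw [List.drop_eq_nil_of_le hi]
    unfold checkA
    simp [hi, myComp, chk]
  · replace hi : i < path.length := by omega
    rw [myComp_drop path i hi]
    unfold checkA
    rw [if_neg (by omega)]
    have hjge : i + 1 ≤ skipA path (path.getD i 0) (i + 1) :=
      skipA_ge path (path.getD i 0) (i + 1)
    have hjle : skipA path (path.getD i 0) (i + 1) ≤ path.length :=
      skipA_le path (path.getD i 0) (i + 1) (by omega)
    by_cases hb : (bndLow low (path.getD i 0) && bndHigh high (path.getD i 0)) = true
    · rw [if_neg (not_not_intro hb)]
      by_cases hend : skipA path (path.getD i 0) (i + 1) = path.length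
      · rw [if_pos hend, if_pos hend]
        simp only [chk, Bool.and_true]
        exact hb.symm
      · rw [if_neg hend, if_neg hend]
        have hjlt : skipA path (path.getD i 0) (i + 1) < path.length := by omega
        obtain ⟨r, hr⟩ := myComp_cons (path[skipA path (path.getD i 0) (i + 1)])
          (List.drop (skipA path (path.getD i 0) (i + 1) + 1) path)
        have hdj : List.drop (skipA path (path.getD i 0) (i + 1)) path =
            path[skipA path (path.getD i 0) (i + 1)] ::
              List.drop (skipA path (path.getD i 0) (i + 1) + 1) path :=
          List.drop_eq_getElem_cons hjlt
        have hgdj : path.getD (skipA path (path.getD i 0) (i + 1)) 0 =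
            path[skipA path (path.getD i 0) (i + 1)] := by
          rw [List.getD_eq_getElem?_getD, List.getElem?_eq_getElem hjlt]; rfl
        rw [hdj, hr, hgdj]
        by_cases hc : path[skipA path (path.getD i 0) (i + 1)] < path.getD i 0
        · rw [if_pos hc]
          have hrec := checkA_eq_chk path (skipA path (path.getD i 0) (i + 1)) low
            (some (path.getD i 0))
          rw [hdj, hr] at hrec
          rw [hrec]
          simp only [chk]
          rw [hb, Bool.true_and, if_pos hc]
        · rw [if_neg hc]
          have hrec := checkA_eq_chk path (skipA path (path.getD i 0) (i + 1))
            (some (path.getD i 0)) high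
          rw [hdj, hr] at hrec
          rw [hrec]
          simp only [chk]
          rw [hb, Bool.true_and, if_neg hc]
    · rw [if_pos hb]
      rw [Bool.not_eq_true] at hb
      split
      · exact (chk_bnd_false _ _ _ _ hb).symm
      · exact (chk_bnd_false _ _ _ _ hb).symm
termination_by path.length - i
decreasing_by all_goals omega

theorem chk_iff (c : List Int) (low high : Option Int) :
    chk c low high = true ↔
      c ≠ [] ∧ (∀ v ∈ c, lowP low v ∧ highP high v) ∧ P c := by
  induction c generalizing low high with
  | nil => simp [chk]
  | cons x rest ih =>
    cases rest with
    | nil =>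
      simp [chk, P, bndLow_iff, bndHigh_iff]
    | cons y l =>
      constructor
      · intro h
        simp only [chk, Bool.and_eq_true, bndLow_iff, bndHigh_iff] at h
        obtain ⟨⟨hlx, hhx⟩, hrec⟩ := h
        by_cases hc : y < x
        · rw [if_pos hc] at hrec
          obtain ⟨-, hall, hP⟩ := (ih low (some x)).mp hrec
          refine ⟨by simp, ?_, ?_, hP⟩
          · intro v hv
            rcases List.mem_cons.mp hv with hv | hv
            · exact hv ▸ ⟨hlx, hhx⟩
            · obtain ⟨hl, hh⟩ := hall v hv
              have hvx : v < x := hh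
              refine ⟨hl, ?_⟩
              cases high with
              | none => trivial
              | some hB => exact lt_trans hvx hhx
          · intro v hv
            obtain ⟨hl, hh⟩ := hall v hv
            have hvx : v < x := hh
            exact ⟨⟨fun _ => hc, fun _ => hvx⟩, by omega⟩
        · rw [if_neg hc] at hrec
          obtain ⟨-, hall, hP⟩ := (ih (some x) high).mp hrec
          refine ⟨by simp, ?_, ?_, hP⟩
          · intro v hv
            rcases List.mem_cons.mp hv with hv | hv
            · exact hv ▸ ⟨hlx, hhx⟩
            · obtain ⟨hl, hh⟩ := hall v hv
              have hvx : x < v := hl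
              refine ⟨?_, hh⟩
              cases low with
              | none => trivial
              | some lB => exact lt_trans hlx hvx
          · intro v hv
            obtain ⟨hl, hh⟩ := hall v hv
            have hvx : x < v := hl
            exact ⟨by constructor <;> intro <;> omega, by omega⟩
      · rintro ⟨-, hall, hside2, hP⟩
        obtain ⟨hlx, hhx⟩ := hall x (by simp)
        simp only [chk, Bool.and_eq_true, bndLow_iff, bndHigh_iff]
        refine ⟨⟨hlx, hhx⟩, ?_⟩
        by_cases hc : y < x
        · rw [if_pos hc]
          apply (ih low (some x)).mpr
          refine ⟨by simp, ?_, hP⟩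
          intro v hv
          obtain ⟨hl, -⟩ := hall v (List.mem_cons_of_mem x hv)
          obtain ⟨hvi, hvne⟩ := hside2 v hv
          exact ⟨hl, hvi.mpr hc⟩
        · rw [if_neg hc]
          apply (ih (some x) high).mpr
          refine ⟨by simp, ?_, hP⟩
          intro v hv
          obtain ⟨-, hh⟩ := hall v (List.mem_cons_of_mem x hv)
          obtain ⟨hvi, hvne⟩ := hside2 v hv
          have : ¬ v < x := fun hvx => hc (hvi.mp hvx)
          exact ⟨show x < v by omega, hh⟩

theorem loopB_yes (c : List Int) : loopB c = "YES" ↔ P c := by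
  induction c with
  | nil => simp [loopB, P]
  | cons x rest ih =>
    cases rest with
    | nil => simp [loopB, P]
    | cons y l =>
      simp only [loopB, P]
      by_cases h : (y :: l).any (fun v => v == x || (decide (v < x) != decide (y < x))) = true
      · rw [if_pos h]
        simp only [List.any_eq_true] at h
        obtain ⟨v, hv, hcond⟩ := h
        constructor
        · intro hno; exact absurd hno (by decide)
        · rintro ⟨hall, -⟩
          obtain ⟨hvi, hvne⟩ := hall v hv
          simp only [Bool.or_eq_true, beq_iff_eq, bne_iff_ne, ne_eq, decide_eq_decide] at hcond
          rcases hcond with h1 | h1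
          · exact absurd h1 hvne
          · exact (h1 hvi).elim
      · rw [if_neg h]
        rw [ih]
        simp only [List.any_eq_true, not_exists] at h
        constructor
        · intro hP
          refine ⟨?_, hP⟩
          intro v hv
          have := h v
          simp only [hv, Bool.or_eq_true, beq_iff_eq, bne_iff_ne, ne_eq, decide_eq_decide,
            not_or, true_and, not_not] at this
          exact ⟨this.2, this.1⟩
        · rintro ⟨-, hP⟩; exact hP

theorem loopB_yes_or_no (c : List Int) : loopB c = "YES" ∨ loopB c = "NO" := by
  induction c with
  | nil => left; rfl
  | cons x rest ih =>
    cases rest with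
    | nil => left; rfl
    | cons y l =>
      simp only [loopB]
      split
      · right; rfl
      · exact ih

-- ===== VERDICT (by name: the statement is the Claim_ definition above) =====
theorem is_bst_path_spec : Claim_equal_is_bst_path := by
  intro path _
  unfold Spec_is_bst_path is_bst_path is_bst_path_alt
  have hA := checkA_eq_chk path 0 none none
  rw [List.drop_zero] at hA
  rw [hA, compressB_eq]
  by_cases hc : myComp path = []
  · simp [hc, chk]
  · rw [if_neg hc]
    by_cases h : chk (myComp path) none none = true
    · rw [if_pos h]
      have hP : P (myComp path) := ((chk_iff _ none none).mp h).2.2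
      exact ((loopB_yes _).mpr hP).symm
    · rw [if_neg h]
      rcases loopB_yes_or_no (myComp path) with hy | hn
      · exfalso
        apply h
        rw [chk_iff]
        exact ⟨hc, fun v _ => ⟨trivial, trivial⟩, (loopB_yes _).mp hy⟩
      · exact hn.symm
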